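-- pv_equiv track=rewrite | github.com/BoudewijnKlijn/competitive_programming | leetcode/leetcode_2598.py | not_so_fast
-- ===== SOURCE A (Python) =====
-- from collections import Counter
-- from typing import List
--
-- def not_so_fast(nums: List[int], value: int) -> int:
--     remainders = [num % value for num in nums]
--     count = Counter(remainders)
--     ans = 0
--     rem = ans % value
--     while rem in count and count[rem] > 0:
--         count[rem] -= 1
--         ans += 1
--         rem = ans % value
--     return ans
-- ===== SOURCE B (Python) =====
-- from collections import Counter
-- from typing import List
--
-- def not_so_fast(nums: List[int], value: int) -> int:
--     count = Counter(num % value for num in nums)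
--     candidates = [count[r] * value + r for r in count]
--     candidates += [r for r in range(min(value, len(count) + 1)) if r not in count]
--     return min(candidates)
-- ===== Notes on version B (the rewrite author's own statement) =====
-- stated objective: alternative
-- what changed: Replaces A's unit-stepping while-loop that mutates the Counter until it stalls by a closed form: each residue class r first fails at count[r]*value + r (absent residues at r), so the answer is the minimum of these over the present residues together with the smallest absent residue.
-- outside the precondition, e.g. on not_so_fast([1], -2): A returns 0, B returns -3
import Mathlib
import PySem

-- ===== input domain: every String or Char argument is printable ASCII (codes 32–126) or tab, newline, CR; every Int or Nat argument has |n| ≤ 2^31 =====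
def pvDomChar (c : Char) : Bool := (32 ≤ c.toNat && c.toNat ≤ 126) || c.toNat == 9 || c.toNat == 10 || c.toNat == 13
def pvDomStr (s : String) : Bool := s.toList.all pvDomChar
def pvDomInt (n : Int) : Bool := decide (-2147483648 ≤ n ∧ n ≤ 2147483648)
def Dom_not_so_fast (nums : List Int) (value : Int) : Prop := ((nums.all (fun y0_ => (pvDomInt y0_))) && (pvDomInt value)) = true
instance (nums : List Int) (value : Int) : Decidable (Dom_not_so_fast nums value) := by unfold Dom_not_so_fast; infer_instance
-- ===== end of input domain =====

-- B replaces A's unit-stepping while-loop over a mutated Counter by a closed form: the answer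
-- is the minimum of count[r]*value + r over present residues r together with the smallest
-- absent residue; objective: alternative (a closed form instead of the stepping loop).


-- ===== PORT A =====
-- the while-loop: one fuel step per check of the condition; the fuel supplied in not_so_fast is
-- sufficient because the loop stops after at most nums.length * value increments (proved below)
def pvLoopA (value : Int) : Nat → PySem.Dict Int Int → Int → Int
  | 0, _, ans => ans
  | fuel + 1, count, ans =>
    let rem := PySem.Int.mod ans value
    match count.get? rem with
    | none => ans
    | some c =>
      if 0 < c then
        pvLoopA value fuel (count.modify rem 0 (fun x => x - 1)) (ans + 1)
      else ans

def not_so_fast (nums : List Int) (value : Int) : Int :=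
  let remainders := nums.map (fun num => PySem.Int.mod num value)
  let count := PySem.Dict.counter remainders
  pvLoopA value (nums.length * value.toNat + 1) count 0

-- ===== PORT B =====
-- 'for r in count' iterates the Counter's keys in insertion order; 'min(candidates)' is
-- PySem.List.min?; its .getD 0 is unreachable under Pre_ (candidates is then nonempty) —
-- in Python B an empty candidates list raises ValueError, excluded by Pre_.
def not_so_fast_alt (nums : List Int) (value : Int) : Int :=
  let count := PySem.Dict.counter (nums.map (fun num => PySem.Int.mod num value))
  let candidates :=
    count.keys.map (fun r => count.getD r 0 * value + r)
      ++ (PySem.List.pyRange 0 (min value ((count.size : Int) + 1))).filter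
          (fun r => !(count.contains r))
  (PySem.List.min? candidates id).getD 0

-- ===== PRECONDITION & SPEC =====
-- Pre_ excludes value ≤ 0 (outside the function's natural domain value ≥ 1): at value = 0 both
-- programs raise (ZeroDivisionError / ValueError on an empty min); for value < 0 A still returns
-- a value but B's closed form over the then-empty/negative residue ranges returns a different
-- value or raises ValueError.
def Pre_not_so_fast (nums : List Int) (value : Int) : Prop := 1 ≤ value
instance (nums : List Int) (value : Int) : Decidable (Pre_not_so_fast nums value) := by unfold Pre_not_so_fast; infer_instance
def pvWitness_not_so_fast : List Int × Int := ([1, 2, 3, 5], 2)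
def Spec_not_so_fast (nums : List Int) (value : Int) (out : Int) : Prop := out = not_so_fast_alt nums value
instance (nums : List Int) (value : Int) (out : Int) : Decidable (Spec_not_so_fast nums value out) := by unfold Spec_not_so_fast; infer_instance

-- ===== CLAIM (what is proved, stated in full; the proofs are below) =====
def Claim_equal_not_so_fast : Prop := ∀ (nums : List Int) (value : Int), Dom_not_so_fast nums value → Pre_not_so_fast nums value → Spec_not_so_fast nums value (not_so_fast nums value)

-- ===== LEMMAS AND PROOFS =====

-- how many loop steps k < a touch residue ρ, in closed form
lemma pv_hits_closed (V ρ : Nat) (hV : 0 < V) (hρ : ρ < V) (a : Nat) :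
    (List.range a).countP (fun k => k % V == ρ) =
      a / V + (if ρ < a % V then 1 else 0) := by
  induction a with
  | zero => simp
  | succ a ih =>
    rw [List.range_succ, List.countP_append, ih]
    have hsV : a % V < V := Nat.mod_lt _ hV
    have hdm : V * (a / V) + a % V = a := Nat.div_add_mod a V
    by_cases hlt : a % V + 1 < V
    · have h1 : a + 1 = V * (a / V) + (a % V + 1) := by omega
      have hm : (a + 1) % V = a % V + 1 := by
        rw [h1, Nat.mul_add_mod]; exact Nat.mod_eq_of_lt hlt
      have hd : (a + 1) / V = a / V := by
        rw [h1, Nat.mul_add_div hV, Nat.div_eq_of_lt hlt, Nat.add_zero]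
      rw [hm, hd]
      simp only [List.countP_cons, List.countP_nil, beq_iff_eq]
      by_cases he : a % V = ρ <;> split_ifs <;> omega
    · have hEq : a % V + 1 = V := by omega
      have h1 : a + 1 = V * (a / V + 1) := by rw [Nat.mul_succ]; omega
      have hm : (a + 1) % V = 0 := by rw [h1]; exact Nat.mul_mod_right _ _
      have hd : (a + 1) / V = a / V + 1 := by
        rw [h1]; exact Nat.mul_div_cancel_left _ hV
      rw [hm, hd]
      simp only [List.countP_cons, List.countP_nil, beq_iff_eq]
      by_cases he : a % V = ρ <;> split_ifs <;> omega

-- min? of a nonempty list is some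
lemma pv_min?_isSome {α κ : Type} [LT κ] [DecidableLT κ] (xs : List α) (key : α → κ)
    (hne : xs ≠ []) : ∃ m, PySem.List.min? xs key = some m := by
  match xs with
  | [] => exact absurd rfl hne
  | x :: xs =>
    suffices h : ∀ (ys : List α) (a : α),
        ∃ m, List.foldl (fun acc y => match acc with
          | none => some y
          | some mm => if key y < key mm then some y else some mm) (some a) ys = some m by
      simpa [PySem.List.min?] using h xs x
    intro ys
    induction ys with
    | nil => exact fun a => ⟨a, rfl⟩
    | cons y ys ih =>
      intro a
      simp only [List.foldl_cons]
      split_ifs <;> exact ih _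

-- pigeonhole: some residue r ≤ number-of-distinct-residues is absent from rs
lemma pv_missing (rs : List Int) :
    ∃ r : Nat, r ≤ (PySem.Dict.counter rs).size ∧ ((r : Nat) : Int) ∉ rs := by
  by_contra hcon
  push Not at hcon
  have hnd := PySem.Dict.nodup_keys_counter rs
  have hlen : (PySem.Dict.counter rs).keys.length = (PySem.Dict.counter rs).size := by
    simp [PySem.Dict.keys, PySem.Dict.size]
  have hsub : (Finset.range ((PySem.Dict.counter rs).size + 1)).image (fun r : Nat => (r : Int))
      ⊆ (PySem.Dict.counter rs).keys.toFinset := by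
    intro x hx
    obtain ⟨r, hr, rfl⟩ := Finset.mem_image.mp hx
    have hmem : ((r : Nat) : Int) ∈ rs := hcon r (Nat.lt_succ_iff.mp (Finset.mem_range.mp hr))
    rw [List.mem_toFinset, PySem.Dict.keys_counter]
    exact (PySem.Set.mem_ofList rs _).mpr hmem
  have h1 := Finset.card_le_card hsub
  rw [Finset.card_image_of_injective _ Nat.cast_injective, Finset.card_range,
    List.toFinset_card_of_nodup hnd, hlen] at h1
  omega

-- the loop, from state (d, a), returns the minimum m of the per-residue fail points
lemma pv_loop_eq (V : Nat) (hV : 1 ≤ V) (rs : List Int) (m : Nat)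
    (hub : ∀ ρ, ρ < V → m ≤ rs.count (↑ρ) * V + ρ)
    (heq : ∃ ρ, ρ < V ∧ m = rs.count (↑ρ) * V + ρ) :
    ∀ (fuel a : Nat) (d : PySem.Dict Int Int), a ≤ m → m < a + fuel →
      (∀ ρ, ρ < V → d.getD (↑ρ) 0 =
        (rs.count (↑ρ) : Int) - (List.range a).countP (fun k => k % V == ρ)) →
      pvLoopA (↑V) fuel d (↑a) = (↑m : Int) := by
  intro fuel
  induction fuel with
  | zero => intro a d ham hfuel _; omega
  | succ fuel ih =>
    intro a d ham hfuel hinv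
    have hsV : a % V < V := Nat.mod_lt _ hV
    have hdm : V * (a / V) + a % V = a := Nat.div_add_mod a V
    have hrem : PySem.Int.mod (↑a) (↑V) = ((a % V : Nat) : Int) :=
      PySem.Int.mod_natCast a V
    have hhits : (List.range a).countP (fun k => k % V == a % V) = a / V := by
      rw [pv_hits_closed V (a % V) (by omega) hsV a]; simp
    have hgetD : d.getD ((a % V : Nat) : Int) 0 = (rs.count ((a % V : Nat) : Int) : Int) - (a / V : Nat) := by
      rw [hinv (a % V) hsV, hhits]
    -- the loop's condition is equivalent to count (a%V) > a/V, i.e. to a < fail point of a%V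
    obtain ⟨ρ0, hρ0, hm0⟩ := heq
    have hstop : rs.count ((a % V : Nat) : Int) ≤ a / V → a = m := by
      intro hle
      have : rs.count ((a % V : Nat) : Int) * V + a % V ≤ a := by
        have h1 : rs.count ((a % V : Nat) : Int) * V ≤ V * (a / V) :=
          (Nat.mul_le_mul_right V hle).trans_eq (Nat.mul_comm _ _)
        omega
      have := hub (a % V) hsV
      omega
    have hgo : a / V < rs.count ((a % V : Nat) : Int) → a < m := by
      intro hgt
      rcases Nat.lt_or_ge a m with h | h
      · exact h
      · exfalso
        have ha : a = m := le_antisymm ham h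
        subst ha
        -- a = m = count ρ0 * V + ρ0, so a % V = ρ0 and a / V = count ρ0
        have hmod : a % V = ρ0 := by
          rw [hm0, Nat.mul_comm, Nat.mul_add_mod]; exact Nat.mod_eq_of_lt hρ0
        have hdiv : a / V = rs.count (↑ρ0) := by
          rw [hm0, Nat.mul_comm, Nat.mul_add_div (by omega), Nat.div_eq_of_lt hρ0, Nat.add_zero]
        rw [hmod] at hgt
        omega
    show pvLoopA (↑V) (fuel + 1) d (↑a) = (↑m : Int)
    rw [pvLoopA]
    simp only [hrem]
    cases hget : d.get? ((a % V : Nat) : Int) with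
    | none =>
      have h0 : d.getD ((a % V : Nat) : Int) 0 = 0 := PySem.Dict.getD_of_get?_eq_none d 0 hget
      have : a = m := by
        apply hstop
        rw [h0] at hgetD
        omega
      simp [this]
    | some c =>
      have hc : d.getD ((a % V : Nat) : Int) 0 = c := PySem.Dict.getD_of_get?_eq_some d 0 hget
      by_cases hpos : 0 < c
      · simp only [hpos, if_pos]
        have halt : a < m := by
          apply hgo
          rw [hc] at hgetD
          omega
        have hrec := ih (a + 1) (d.modify ((a % V : Nat) : Int) 0 (fun x => x - 1))
          (by omega) (by omega) ?_
        · rw [← hrec]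
          norm_num
        · intro ρ hρ
          rw [PySem.Dict.getD_modify, List.range_succ, List.countP_append]
          simp only [List.countP_cons, List.countP_nil, beq_iff_eq]
          by_cases he : (ρ : Int) = ((a % V : Nat) : Int)
          · have heN : a % V = ρ := by exact_mod_cast he.symm
            subst heN
            rw [if_pos he, hgetD, hhits]
            have hone : (if a % V = a % V then 1 else 0) = 1 := if_pos rfl
            rw [hone]
            omega
          · have heN : ¬ (a % V = ρ) := fun h => he (by exact_mod_cast h.symm)
            rw [if_neg he, hinv ρ hρ]
            simp [heN]
      · simp only [hpos, if_false]
        have : a = m := by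
          apply hstop
          rw [hc] at hgetD
          omega
        simp [this]

-- ===== VERDICT (by name: the statement is the Claim_ definition above) =====
theorem not_so_fast_spec : Claim_equal_not_so_fast := by
  intro nums value hdom hpre
  unfold Pre_not_so_fast at hpre
  unfold Spec_not_so_fast
  lift value to ℕ using (by omega) with V
  have hV : 1 ≤ V := by exact_mod_cast hpre
  obtain ⟨V', rfl⟩ : ∃ V', V = V' + 1 := ⟨V - 1, by omega⟩
  unfold not_so_fast not_so_fast_alt
  simp only [Int.toNat_natCast]
  set rs : List Int := nums.map (fun num => PySem.Int.mod num ((V' + 1 : Nat) : Int)) with hrs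
  set C : PySem.Dict Int Int := PySem.Dict.counter rs with hC
  set S : Nat := C.size with hS
  set F : Nat → Nat := fun ρ => rs.count (↑ρ) * (V' + 1) + ρ with hF
  set cands : List Int :=
    C.keys.map (fun r => C.getD r 0 * ((V' + 1 : Nat) : Int) + r)
      ++ (PySem.List.pyRange 0 (min ((V' + 1 : Nat) : Int) ((S : Int) + 1))).filter
          (fun r => !(C.contains r)) with hcands
  -- every element of rs is a residue ↑ρ with ρ < V'+1
  have hρbound : ∀ x ∈ rs, ∃ ρ : Nat, ρ < V' + 1 ∧ x = (↑ρ : Int) := by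
    intro x hx
    rw [hrs] at hx
    obtain ⟨num, -, rfl⟩ := List.mem_map.mp hx
    have hpos : (0 : Int) < ((V' + 1 : Nat) : Int) := by exact_mod_cast Nat.succ_pos V'
    have h1 := PySem.Int.mod_nonneg num hpos
    have h2 := PySem.Int.mod_lt num hpos
    exact ⟨(PySem.Int.mod num ((V' + 1 : Nat) : Int)).toNat, by omega, by omega⟩
  have hmin' : min ((V' + 1 : Nat) : Int) ((S : Int) + 1) = ((min (V' + 1) (S + 1) : Nat) : Int) := by
    push_cast; rfl
  have hpy : PySem.List.pyRange 0 ((min (V' + 1) (S + 1) : Nat) : Int)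
      = (List.range (min (V' + 1) (S + 1))).map (fun k => ((k : Nat) : Int)) :=
    PySem.List.pyRange_zero_natCast _
  -- every candidate is ↑(F ρ) for some residue ρ
  have hcand : ∀ y ∈ cands, ∃ ρ : Nat, ρ < V' + 1 ∧ y = ((F ρ : Nat) : Int) := by
    intro y hy
    rcases List.mem_append.mp hy with hy | hy
    · obtain ⟨k, hk, rfl⟩ := List.mem_map.mp hy
      rw [hC, PySem.Dict.keys_counter] at hk
      obtain ⟨ρ, hρ, rfl⟩ := hρbound k ((PySem.Set.mem_ofList rs k).mp hk)
      refine ⟨ρ, hρ, ?_⟩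
      rw [hC, PySem.Dict.getD_counter, hF]
      push_cast
      ring
    · rw [List.mem_filter, hmin', hpy] at hy
      obtain ⟨hy1, hy2⟩ := hy
      obtain ⟨ρ, hρ, rfl⟩ := List.mem_map.mp hy1
      have hρV : ρ < V' + 1 := lt_of_lt_of_le (List.mem_range.mp hρ) (Nat.min_le_left _ _)
      have hnotin : ((ρ : Nat) : Int) ∉ rs := by
        intro hmem
        rw [hC, PySem.Dict.contains_counter] at hy2
        simp [hmem] at hy2
      refine ⟨ρ, hρV, ?_⟩
      rw [hF]
      simp [List.count_eq_zero.mpr hnotin]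
  -- every residue ρ has a candidate ≤ ↑(F ρ)
  have hrep : ∀ ρ : Nat, ρ < V' + 1 → ∃ y ∈ cands, y ≤ ((F ρ : Nat) : Int) := by
    intro ρ hρ
    by_cases hin : ((ρ : Nat) : Int) ∈ rs
    · refine ⟨C.getD (↑ρ) 0 * ((V' + 1 : Nat) : Int) + (↑ρ), ?_, ?_⟩
      · rw [hcands]
        apply List.mem_append_left
        exact List.mem_map_of_mem (by
          rw [hC, PySem.Dict.keys_counter]
          exact (PySem.Set.mem_ofList rs _).mpr hin)
      · rw [hC, PySem.Dict.getD_counter, hF]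
        push_cast
        ring_nf
        exact le_refl _
    · have hcnt : rs.count ((ρ : Nat) : Int) = 0 := List.count_eq_zero.mpr hin
      have hFρ : F ρ = ρ := by rw [hF]; simp [hcnt]
      have hfilter : ∀ r : Nat, r < min (V' + 1) (S + 1) → ((r : Nat) : Int) ∉ rs →
          ((r : Nat) : Int) ∈ cands := by
        intro r hr hrnot
        rw [hcands]
        apply List.mem_append_right
        rw [List.mem_filter, hmin', hpy]
        constructor
        · exact List.mem_map_of_mem (List.mem_range.mpr hr)
        · rw [hC, PySem.Dict.contains_counter]
          simp [hrnot]
      by_cases hρS : ρ < S + 1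
      · exact ⟨(↑ρ : Int), hfilter ρ (lt_min hρ hρS) hin, by rw [hFρ]⟩
      · obtain ⟨r, hrS, hrnot⟩ := pv_missing rs
        rw [← hC, ← hS] at hrS
        refine ⟨((r : Nat) : Int), hfilter r (by omega) hrnot, ?_⟩
        rw [hFρ]
        exact_mod_cast Nat.le_of_lt (by omega)
  -- candidates is nonempty, so min? is some
  obtain ⟨y0, hy0, -⟩ := hrep 0 (by omega)
  obtain ⟨M, hM⟩ := pv_min?_isSome cands id (List.ne_nil_of_mem hy0)
  rw [hM]
  obtain ⟨ρ0, hρ0, hM0⟩ : ∃ ρ0 : Nat, ρ0 < V' + 1 ∧ M = ((F ρ0 : Nat) : Int) :=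
    hcand M (PySem.List.min?_mem hM)
  set m : Nat := F ρ0 with hm
  have hub : ∀ ρ : Nat, ρ < V' + 1 → m ≤ rs.count (↑ρ) * (V' + 1) + ρ := by
    intro ρ hρ
    obtain ⟨y, hy, hyle⟩ := hrep ρ hρ
    have h1 := PySem.List.min?_isMin hM y hy
    have h2 : ((m : Nat) : Int) ≤ ((F ρ : Nat) : Int) := by
      rw [← hM0] at *
      exact le_trans h1 hyle
    rw [hF] at h2
    exact_mod_cast h2
  have hcnt0 : rs.count 0 ≤ nums.length := by
    have h := List.count_le_length (a := (0 : Int)) (l := rs)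
    rwa [hrs, List.length_map] at h
  have hmle : m ≤ nums.length * (V' + 1) := by
    have h0 := hub 0 (by omega)
    have h2 : rs.count ((0 : Nat) : Int) * (V' + 1) ≤ nums.length * (V' + 1) :=
      Nat.mul_le_mul_right _ (by exact_mod_cast hcnt0)
    omega
  have hloop := pv_loop_eq (V' + 1) (by omega) rs m hub ⟨ρ0, hρ0, rfl⟩
    (nums.length * (V' + 1) + 1) 0 C
    (Nat.zero_le m) (by omega)
    (by intro ρ hρ; rw [hC]; simp [PySem.Dict.getD_counter])
  rw [Nat.cast_zero] at hloop
  rw [hloop, hM0, Option.getD_some]
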